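-- pv_equiv track=rewrite | github.com/Accelerator-mzq/AGENT_UE5_v0.3 | Plugins/AgentBridge/Scripts/compiler/analysis/delta_scope_analyzer.py | _build_affected_domains
-- ===== SOURCE A (Python) =====
-- from typing import Any, Dict, List, Optional
--
-- SUPPORTED_DOMAINS = [
--     "world",
--     "runtime",
--     "ui",
--     "audio",
--     "config",
--     "validation",
--     "governance",
-- ]
--
-- def _build_affected_domains(affected_specs: List[str]) -> List[str]:
--     """根据受影响 spec 推导域。"""
--     domains = []
--     if "scene_spec" in affected_specs:
--         domains.append("world")
--     if "validation_spec" in affected_specs: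
--         domains.append("validation")
--     if "boardgame_spec" in affected_specs:
--         domains.append("governance")
--     if "turn_flow_spec" in affected_specs or "runtime_wiring_spec" in affected_specs:
--         domains.append("runtime")
--     if "decision_ui_spec" in affected_specs:
--         domains.append("ui")
--     return [domain for domain in domains if domain in SUPPORTED_DOMAINS]
-- ===== SOURCE B (Python) =====
-- SUPPORTED_DOMAINS = [
--     "world",
--     "runtime",
--     "ui",
--     "audio",
--     "config",
--     "validation",
--     "governance",
-- ]
--
-- _SPEC_TO_DOMAIN = {
--     "scene_spec": "world",
--     "validation_spec": "validation",
--     "boardgame_spec": "governance",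
--     "turn_flow_spec": "runtime",
--     "runtime_wiring_spec": "runtime",
--     "decision_ui_spec": "ui",
-- }
--
-- _OUTPUT_ORDER = ["world", "validation", "governance", "runtime", "ui"]
--
-- def _build_affected_domains(affected_specs):
--     """Single pass over the input: map each spec to its domain, then emit hits in the fixed order."""
--     hit = {_SPEC_TO_DOMAIN[s] for s in affected_specs if s in _SPEC_TO_DOMAIN}
--     return [d for d in _OUTPUT_ORDER if d in hit]
-- ===== Notes on version B (the rewrite author's own statement) =====
-- stated objective: simpler
-- what changed: Inverts the traversal: instead of testing five fixed conditions against the list, B scans the INPUT once, maps each spec to its domain via a spec->domain dict into a set of hit domains, then emits a fixed order list filtered by that set; the SUPPORTED_DOMAINS filter disappears (all emitted domains are supported by construction).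
import Mathlib
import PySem

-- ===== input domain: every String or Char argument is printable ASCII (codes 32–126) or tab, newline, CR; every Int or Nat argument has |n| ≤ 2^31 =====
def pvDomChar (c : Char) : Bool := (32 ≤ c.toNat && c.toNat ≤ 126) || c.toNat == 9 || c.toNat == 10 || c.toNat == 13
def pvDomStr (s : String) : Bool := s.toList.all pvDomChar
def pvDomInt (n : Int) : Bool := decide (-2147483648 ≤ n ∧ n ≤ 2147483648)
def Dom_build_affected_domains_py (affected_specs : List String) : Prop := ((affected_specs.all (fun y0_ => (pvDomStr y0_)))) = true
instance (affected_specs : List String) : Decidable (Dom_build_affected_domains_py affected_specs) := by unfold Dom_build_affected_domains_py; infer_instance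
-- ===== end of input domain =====

-- B inverts the traversal: one pass over the input mapping specs to domains via a dict
-- into a set, then the hit domains are emitted in a fixed order (objective: simpler).

-- ===== PORT A =====
def SUPPORTED_DOMAINS : List String :=
  ["world", "runtime", "ui", "audio", "config", "validation", "governance"]

-- Port of A: five hard-coded membership branches, then the SUPPORTED_DOMAINS filter.
def build_affected_domains_py (affected_specs : List String) : List String :=
  let domains : List String := []
  let domains := if affected_specs.contains "scene_spec" then domains ++ ["world"] else domains
  let domains := if affected_specs.contains "validation_spec" then domains ++ ["validation"] else domains
  let domains := if affected_specs.contains "boardgame_spec" then domains ++ ["governance"] else domains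
  let domains := if affected_specs.contains "turn_flow_spec" || affected_specs.contains "runtime_wiring_spec" then domains ++ ["runtime"] else domains
  let domains := if affected_specs.contains "decision_ui_spec" then domains ++ ["ui"] else domains
  domains.filter (fun d => SUPPORTED_DOMAINS.contains d)

-- ===== PORT B =====
def pvSpecToDomain : PySem.Dict String String :=
  PySem.Dict.mk [("scene_spec", "world"),
   ("validation_spec", "validation"),
   ("boardgame_spec", "governance"),
   ("turn_flow_spec", "runtime"),
   ("runtime_wiring_spec", "runtime"),
   ("decision_ui_spec", "ui")]

def pvOutputOrder : List String := ["world", "validation", "governance", "runtime", "ui"]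

-- Port of B: the set comprehension {_SPEC_TO_DOMAIN[s] for s in affected_specs if s in _SPEC_TO_DOMAIN}
-- is a fold of Set.add over the successful dict lookups; then the fixed-order emit.
def build_affected_domains_py_alt (affected_specs : List String) : List String :=
  let hit : PySem.Set String :=
    affected_specs.foldl
      (fun s spec => match PySem.Dict.get? pvSpecToDomain spec with
        | some d => PySem.Set.add s d
        | none => s) PySem.Set.empty
  pvOutputOrder.filter (fun d => PySem.Set.contains hit d)

-- ===== PRECONDITION & SPEC =====
def Spec_build_affected_domains_py (affected_specs : List String) (out : List String) : Prop := out = build_affected_domains_py_alt affected_specs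
instance (affected_specs : List String) (out : List String) : Decidable (Spec_build_affected_domains_py affected_specs out) := by unfold Spec_build_affected_domains_py; infer_instance

-- ===== CLAIM (what is proved, stated in full; the proofs are below) =====
def Claim_equal_build_affected_domains_py : Prop := ∀ (affected_specs : List String), Dom_build_affected_domains_py affected_specs → Spec_build_affected_domains_py affected_specs (build_affected_domains_py affected_specs)

-- ===== LEMMAS AND PROOFS =====
theorem pv_mem_hit (xs : List String) (acc : PySem.Set String) (d : String) :
    (d ∈ xs.foldl
      (fun s spec => match PySem.Dict.get? pvSpecToDomain spec with
        | some dd => PySem.Set.add s dd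
        | none => s) acc)
    ↔ (d ∈ acc ∨ ∃ s ∈ xs, PySem.Dict.get? pvSpecToDomain s = some d) := by
  induction xs generalizing acc with
  | nil => simp
  | cons x xs ih =>
    simp only [List.foldl_cons, ih]
    cases h : PySem.Dict.get? pvSpecToDomain x
    · simp [h]
    · simp only [PySem.Set.mem_add, List.mem_cons]
      constructor
      · rintro ((hd | hd) | ⟨t, ht, hget⟩)
        · exact Or.inl hd
        · exact Or.inr ⟨x, Or.inl rfl, hd ▸ h⟩
        · exact Or.inr ⟨t, Or.inr ht, hget⟩
      · rintro (hd | ⟨t, (rfl | ht), hget⟩)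
        · exact Or.inl (Or.inl hd)
        · exact Or.inl (Or.inr (by rw [h] at hget; exact (Option.some_inj.mp hget).symm))
        · exact Or.inr ⟨t, ht, hget⟩

theorem pv_get_dom (s d : String) :
    (PySem.Dict.get? pvSpecToDomain s == some d)
    = (("scene_spec" == s && "world" == d) || ("validation_spec" == s && "validation" == d)
      || ("boardgame_spec" == s && "governance" == d) || ("turn_flow_spec" == s && "runtime" == d)
      || ("runtime_wiring_spec" == s && "runtime" == d) || ("decision_ui_spec" == s && "ui" == d)) := by
  simp only [pvSpecToDomain, PySem.Dict.get?_mk_cons, beq_iff_eq]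
  split_ifs with g1 g2 g3 g4 g5 g6 <;> (try subst s) <;> simp_all [PySem.Dict.get?]

set_option maxHeartbeats 1000000 in
theorem pv_eq (xs : List String) :
    build_affected_domains_py xs = build_affected_domains_py_alt xs := by
  simp only [build_affected_domains_py, build_affected_domains_py_alt]
  have hc : ∀ d, PySem.Set.contains
      (xs.foldl (fun s spec => match PySem.Dict.get? pvSpecToDomain spec with
        | some dd => PySem.Set.add s dd
        | none => s) PySem.Set.empty) d
      = xs.any (fun s => PySem.Dict.get? pvSpecToDomain s == some d) := by
    intro d
    apply Bool.eq_iff_iff.mpr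
    simp only [PySem.Set.contains_iff, pv_mem_hit, PySem.Set.empty, List.any_eq_true, beq_iff_eq]
    simp
  simp only [hc]
  by_cases h1 : "scene_spec" ∈ xs <;>
  by_cases h2 : "validation_spec" ∈ xs <;>
  by_cases h3 : "boardgame_spec" ∈ xs <;>
  by_cases h4 : "turn_flow_spec" ∈ xs <;>
  by_cases h5 : "runtime_wiring_spec" ∈ xs <;>
  by_cases h6 : "decision_ui_spec" ∈ xs <;>
  simp [pvOutputOrder, SUPPORTED_DOMAINS, pv_get_dom, List.any_eq_true, List.filter_cons,
    beq_iff_eq, h1, h2, h3, h4, h5, h6] <;>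
  first
    | exact ⟨_, h4, fun hh => absurd rfl hh⟩
    | exact ⟨_, h5, fun _ => rfl⟩
    | exact fun x hx => ⟨fun hh => h4 (hh ▸ hx), fun hh => h5 (hh ▸ hx)⟩

-- ===== VERDICT (by name: the statement is the Claim_ definition above) =====
theorem build_affected_domains_py_spec : Claim_equal_build_affected_domains_py := by
  intro affected_specs _
  unfold Spec_build_affected_domains_py
  exact pv_eq affected_specs
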